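-- pv_equiv track=rewrite | github.com/AbilP20/INeuron-Scrape | application.py | __into_mul_lines
-- ===== SOURCE A (Python) =====
-- def __into_mul_lines(lst_of_string,limit=90):
--     """
--         lst_of_string = list of strings, limit = characters per line you want(by Default = 90 char per line)
--         this function splits the multi-line course description and course teachers into single line strings so that they can be
--         stored in a better looking way in the .txt and .pdf files
--     """
--     a=''
--     trav=0
--     for i in range(len(lst_of_string)):
--         if trav>limit:
--             a = a+'\n'+lst_of_string[i]
--             trav=0
--         else:
--             a = a+lst_of_string[i]
--         trav+=1
--     return a
-- ===== SOURCE B (Python) =====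
-- def __into_mul_lines(lst_of_string, limit=90):
--     """Chunk the strings into blocks of limit+1 and join blocks with newlines."""
--     step = limit + 1
--     lines = []
--     rest = lst_of_string
--     while rest:
--         lines.append(''.join(rest[:step]))
--         rest = rest[step:]
--     return '\n'.join(lines)
-- ===== Notes on version B (the rewrite author's own statement) =====
-- stated objective: simpler
-- what changed: Replaces A's stateful counter-with-reset scan that concatenates string by string with a chunking pass: slice the list into consecutive blocks of limit+1 strings, join each block with '' and the blocks with a newline.
-- outside the precondition, e.g. on __into_mul_lines(['a', 'b'], -1): A returns '\na\nb', B does not finish within the time limit; on __into_mul_lines(['a', 'b'], -2): A returns '\na\nb', B does not finish within the time limit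
import Mathlib
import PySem

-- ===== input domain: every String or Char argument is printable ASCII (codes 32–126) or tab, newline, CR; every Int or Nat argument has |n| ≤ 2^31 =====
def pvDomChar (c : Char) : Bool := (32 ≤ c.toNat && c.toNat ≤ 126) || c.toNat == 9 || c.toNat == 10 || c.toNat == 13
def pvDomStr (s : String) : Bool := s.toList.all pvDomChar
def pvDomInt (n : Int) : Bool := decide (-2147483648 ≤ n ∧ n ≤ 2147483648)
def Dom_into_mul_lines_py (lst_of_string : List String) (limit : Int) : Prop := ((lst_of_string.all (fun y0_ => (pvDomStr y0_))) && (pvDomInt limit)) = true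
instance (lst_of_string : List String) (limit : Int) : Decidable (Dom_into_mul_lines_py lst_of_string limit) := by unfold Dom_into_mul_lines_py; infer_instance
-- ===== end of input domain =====

-- B replaces A's stateful counter-with-reset scan by chunking the list into blocks of
-- limit+1 strings joined with '' and joined by newlines (objective: simpler).


-- ===== PORT A =====
-- loop body of A: 'if trav>limit: a = a+'\n'+lst[i]; trav=0 else: a = a+lst[i]' then 'trav+=1'
def aStep (limit : Int) (st : String × Int) (s : String) : String × Int :=
  let st' := if st.2 > limit then (st.1 ++ "\n" ++ s, (0 : Int)) else (st.1 ++ s, st.2)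
  (st'.1, st'.2 + 1)

-- 'for i in range(len(lst_of_string))' with a=''. trav=0; lst_of_string[i] is always in
-- range, so pyGetD with default "" is exact.
def into_mul_lines_py (lst_of_string : List String) (limit : Int) : String :=
  ((PySem.List.pyRange 0 (PySem.List.len lst_of_string) 1).foldl
      (fun st i => aStep limit st (PySem.List.pyGetD lst_of_string i "")) ("", 0)).1

-- ===== PORT B =====
-- the while loop of Source B: 'while rest: lines.append(''.join(rest[:step])); rest = rest[step:]'.
-- step = limit+1 is encoded as k+1 with k = limit.toNat (equal to limit+1 for limit ≥ 0, i.e.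
-- on Pre_, where rest[:step] / rest[step:] are exactly take/drop); this also makes the loop total.
def bChunks (k : Nat) : List String → List String
  | [] => []
  | s :: t =>
      PySem.Str.join "" ((s :: t).take (k + 1)) :: bChunks k ((s :: t).drop (k + 1))
  termination_by l => l.length
  decreasing_by simp

-- return '\n'.join(lines)
def into_mul_lines_py_alt (lst_of_string : List String) (limit : Int) : String :=
  PySem.Str.join "\n" (bChunks limit.toNat lst_of_string)

-- ===== PRECONDITION & SPEC =====
-- Pre_ excludes negative limits with a nonempty list, on which A's leading-newline output is an
-- accident of its counter logic and B's chunking loop (slice step limit+1 ≤ 0) never terminates.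
def Pre_into_mul_lines_py (lst_of_string : List String) (limit : Int) : Prop :=
  0 ≤ limit ∨ lst_of_string = []
instance (lst_of_string : List String) (limit : Int) : Decidable (Pre_into_mul_lines_py lst_of_string limit) := by unfold Pre_into_mul_lines_py; infer_instance
def pvWitness_into_mul_lines_py : List String × Int := (["ab", "cd", "e"], 1)

def Spec_into_mul_lines_py (lst_of_string : List String) (limit : Int) (out : String) : Prop := out = into_mul_lines_py_alt lst_of_string limit
instance (lst_of_string : List String) (limit : Int) (out : String) : Decidable (Spec_into_mul_lines_py lst_of_string limit out) := by unfold Spec_into_mul_lines_py; infer_instance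

-- ===== CLAIM (what is proved, stated in full; the proofs are below) =====
def Claim_equal_into_mul_lines_py : Prop := ∀ (lst_of_string : List String) (limit : Int), Dom_into_mul_lines_py lst_of_string limit → Pre_into_mul_lines_py lst_of_string limit → Spec_into_mul_lines_py lst_of_string limit (into_mul_lines_py lst_of_string limit)

-- ===== LEMMAS AND PROOFS =====

-- concatenation of a list of strings, as characters
def pvCat (l : List String) : List Char := (l.map String.toList).flatten

theorem bChunks_nil (k : Nat) : bChunks k [] = [] := by simp [bChunks]

theorem bChunks_cons (k : Nat) (s : String) (t : List String) :
    bChunks k (s :: t)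
      = PySem.Str.join "" ((s :: t).take (k + 1)) :: bChunks k ((s :: t).drop (k + 1)) := by
  rw [bChunks]

theorem bChunks_cons_ne_nil (k : Nat) (s : String) (t : List String) :
    bChunks k (s :: t) ≠ [] := by
  rw [bChunks_cons]; simp

theorem pv_join_empty_sep (ps : List (List Char)) : PySem.Chars.join [] ps = ps.flatten := by
  induction ps with
  | nil => rw [PySem.Chars.join_nil]; rfl
  | cons p ps ih =>
    cases ps with
    | nil => rw [PySem.Chars.join_singleton]; simp
    | cons q qs => rw [PySem.Chars.join_cons_cons]; simp_all

theorem pv_strJoin_empty (l : List String) : (PySem.Str.join "" l).toList = pvCat l := by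
  simp only [PySem.Str.toList_join]
  have : ("" : String).toList = [] := rfl
  rw [this, pv_join_empty_sep, pvCat]

theorem pv_strJoin_nl_singleton (c : String) :
    (PySem.Str.join "\n" [c]).toList = c.toList := by
  simp only [PySem.Str.toList_join, List.map_cons, List.map_nil]
  rw [PySem.Chars.join_singleton]

theorem pv_strJoin_nl_cons (c : String) (rest : List String) (h : rest ≠ []) :
    (PySem.Str.join "\n" (c :: rest)).toList
      = c.toList ++ '\n' :: (PySem.Str.join "\n" rest).toList := by
  cases rest with
  | nil => simp at h
  | cons q qs =>
    simp only [PySem.Str.toList_join, List.map_cons]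
    rw [PySem.Chars.join_cons_cons]
    simp

-- the loop of A, started with r remaining slots in the current line (trav = limit+1-r),
-- produces the chunked join of the rest
theorem pv_loopA (limit : Int) (hl : 0 ≤ limit) (t : List String) :
    ∀ (a : String) (r : Nat), (r : Int) ≤ limit + 1 →
    ((t.foldl (aStep limit) (a, limit + 1 - (r : Int))).1).toList
      = a.toList ++ pvCat (t.take r)
        ++ (if r < t.length then
              '\n' :: (PySem.Str.join "\n" (bChunks limit.toNat (t.drop r))).toList
            else []) := by
  induction t with
  | nil => intro a r _; simp [pvCat]
  | cons s t ih =>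
    intro a r hr
    cases r with
    | zero =>
      have hcond : limit + 1 - ((0 : Nat) : Int) > limit := by omega
      have hstep : aStep limit (a, limit + 1 - ((0 : Nat) : Int)) s
          = (a ++ "\n" ++ s, limit + 1 - ((limit.toNat : Nat) : Int)) := by
        simp only [aStep, if_pos hcond]
        have : ((limit.toNat : Nat) : Int) = limit := Int.toNat_of_nonneg hl
        simp [this]
      rw [List.foldl_cons, hstep, ih (a ++ "\n" ++ s) limit.toNat (by omega)]
      simp only [List.take_zero, List.drop_zero, List.length_cons]
      have htake : (s :: t).take (limit.toNat + 1) = s :: t.take limit.toNat := rfl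
      have hdrop : (s :: t).drop (limit.toNat + 1) = t.drop limit.toNat := rfl
      by_cases hlen : limit.toNat < t.length
      · have hne : bChunks limit.toNat ((s :: t).drop (limit.toNat + 1)) ≠ [] := by
          rw [hdrop]
          cases hd : t.drop limit.toNat with
          | nil => rw [List.drop_eq_nil_iff] at hd; omega
          | cons u us => exact bChunks_cons_ne_nil _ _ _
        rw [if_pos hlen, if_pos (by omega), bChunks_cons]
        rw [pv_strJoin_nl_cons _ _ hne, pv_strJoin_empty, htake, hdrop]
        simp [pvCat]
      · have hnil : t.drop limit.toNat = [] := by rw [List.drop_eq_nil_iff]; omega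
        rw [if_neg hlen, if_pos (by omega), bChunks_cons]
        rw [hdrop, hnil]
        rw [bChunks_nil]
        rw [pv_strJoin_nl_singleton, pv_strJoin_empty, htake]
        simp [pvCat]
    | succ r' =>
      have hcond : ¬ (limit + 1 - ((r' + 1 : Nat) : Int) > limit) := by
        push_cast; omega
      have hstep : aStep limit (a, limit + 1 - ((r' + 1 : Nat) : Int)) s
          = (a ++ s, limit + 1 - ((r' : Nat) : Int)) := by
        simp only [aStep, if_neg hcond, Prod.mk.injEq]
        exact ⟨trivial, by omega⟩
      rw [List.foldl_cons, hstep, ih (a ++ s) r' (by push_cast at hr ⊢; omega)]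
      have : (r' + 1 < (s :: t).length) = (r' < t.length) := by
        simp
      simp only [List.take_succ_cons, List.drop_succ_cons, this]
      simp [pvCat]

-- A's range-indexed fold is the fold over the list itself
theorem pv_A_eq_fold (lst : List String) (limit : Int) :
    into_mul_lines_py lst limit = (lst.foldl (aStep limit) ("", 0)).1 := by
  unfold into_mul_lines_py
  rw [PySem.List.foldl_pyRange_zero_pyGetD lst "" (aStep limit) ("", 0)]

-- ===== VERDICT (by name: the statement is the Claim_ definition above) =====
theorem into_mul_lines_py_spec : Claim_equal_into_mul_lines_py := by
  intro lst limit _ hpre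
  unfold Spec_into_mul_lines_py
  rcases hpre with hl | hnil
  · apply String.toList_inj.mp
    rw [pv_A_eq_fold]
    have h0 : (0 : Int) = limit + 1 - ((limit.toNat + 1 : Nat) : Int) := by
      push_cast; omega
    rw [show (("", (0 : Int)) : String × Int)
          = ("", limit + 1 - ((limit.toNat + 1 : Nat) : Int)) by rw [← h0]]
    rw [pv_loopA limit hl lst "" (limit.toNat + 1) (by push_cast; omega)]
    unfold into_mul_lines_py_alt
    cases lst with
    | nil => simp [pvCat, bChunks_nil, PySem.Str.toList_join, PySem.Chars.join_nil]
    | cons s t =>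
      rw [bChunks_cons]
      by_cases hlen : limit.toNat + 1 < (s :: t).length
      · have hne : bChunks limit.toNat ((s :: t).drop (limit.toNat + 1)) ≠ [] := by
          cases hd : (s :: t).drop (limit.toNat + 1) with
          | nil => rw [List.drop_eq_nil_iff] at hd; omega
          | cons u us => exact bChunks_cons_ne_nil _ _ _
        rw [if_pos hlen, pv_strJoin_nl_cons _ _ hne, pv_strJoin_empty]
        simp
      · have hnil : (s :: t).drop (limit.toNat + 1) = [] := by
          rw [List.drop_eq_nil_iff]; omega
        rw [if_neg hlen, hnil]
        rw [bChunks_nil]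
        rw [pv_strJoin_nl_singleton, pv_strJoin_empty]
        simp
  · subst hnil
    apply String.toList_inj.mp
    rw [pv_A_eq_fold]
    simp [into_mul_lines_py_alt, bChunks_nil, PySem.Str.toList_join, PySem.Chars.join_nil]
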